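-- pv_equiv track=rewrite | github.com/liujunsheng0/notes | lintcode/maximum-size-subarray-sum-equals-k.py | maxSubArrayLen2
-- ===== SOURCE A (Python) =====
-- def maxSubArrayLen2(nums, target):
--     """
--     前缀和: sum[i], sum[j] j > i
--     if: sum[i] + k = sum[j] then: k = sum[j] - sum[i]
--     因此每次计算完前缀和后, 只需要判断: 前缀和 - target 是否在dict中, 如果在, 则nums[i + 1: j]即为所求
--     """
--     prefix = 0
--     index = dict()
--     ans = 0
--     for idx, i in enumerate(nums):
--         if i == target:
--             ans = max(ans, 1)
--         prefix += i
--         if prefix == target: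
--             ans = max(ans, idx + 1)
--         if prefix - target in index:
--             ans = max(ans, idx - index[prefix - target])
--         if prefix not in index:
--             index[prefix] = idx
--     return ans
-- ===== SOURCE B (Python) =====
-- def maxSubArrayLen2(nums, target):
--     # Naive check of every contiguous subarray: for each suffix, scan
--     # growing prefixes of it, tracking the running sum. No hashmap.
--     ans = 0
--     suffix = list(nums)
--     while suffix:
--         s = 0
--         length = 0
--         for x in suffix:
--             s += x
--             length += 1
--             if s == target:
--                 ans = max(ans, length)
--         suffix = suffix[1:]
--     return ans
-- ===== Notes on version B (the rewrite author's own statement) =====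
-- stated objective: simpler
-- what changed: Replaces the first-occurrence prefix-sum hashmap (with its three special-case branches) by a plain double loop that sums every subarray directly and keeps the longest hit.
import Mathlib
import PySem

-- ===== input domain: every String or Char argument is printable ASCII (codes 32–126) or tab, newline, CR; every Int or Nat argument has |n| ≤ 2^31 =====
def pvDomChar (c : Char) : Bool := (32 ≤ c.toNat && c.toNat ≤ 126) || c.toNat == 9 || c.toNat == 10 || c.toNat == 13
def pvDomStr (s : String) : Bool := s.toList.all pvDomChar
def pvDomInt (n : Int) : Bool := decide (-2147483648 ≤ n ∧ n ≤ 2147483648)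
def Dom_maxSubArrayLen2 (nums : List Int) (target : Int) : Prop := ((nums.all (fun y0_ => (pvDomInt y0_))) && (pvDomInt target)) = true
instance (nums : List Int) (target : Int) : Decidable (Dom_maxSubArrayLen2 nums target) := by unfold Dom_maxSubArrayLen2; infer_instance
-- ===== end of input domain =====

-- B replaces A's pfx-sum/hashmap scheme with a plain double loop over all subarrays (simpler, not faster).


-- ===== PORT A =====
-- A's for-loop over enumerate(nums), carried as (remaining list, idx counter, pfx, index dict, ans).
-- Python's membership test 'pfx - target in index' followed by the lookup 'index[pfx - target]'
-- is transliterated as one match on Dict.get? (some = member, none = not a member).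
def maxSubArrayLen2Loop (target : Int) : List Int → Int → Int → PySem.Dict Int Int → Int → Int
  | [], _, _, _, ans => ans
  | i :: rest, idx, pfx, index, ans =>
      let ans1 := if i = target then max ans 1 else ans
      let pfx1 := pfx + i
      let ans2 := if pfx1 = target then max ans1 (idx + 1) else ans1
      let ans3 := match index.get? (pfx1 - target) with
                  | some t => max ans2 (idx - t)
                  | none => ans2
      let index1 := if index.contains pfx1 then index else index.insert pfx1 idx
      maxSubArrayLen2Loop target rest (idx + 1) pfx1 index1 ans3

def maxSubArrayLen2 (nums : List Int) (target : Int) : Int :=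
  maxSubArrayLen2Loop target nums 0 0 PySem.Dict.empty 0

-- ===== PORT B =====
-- Source B's inner for-loop: running sum and length over the current suffix.
def maxSubInner (target : Int) : List Int → Int → Int → Int → Int
  | [], _, _, ans => ans
  | x :: rest, s, len, ans =>
      let s1 := s + x
      let len1 := len + 1
      let ans1 := if s1 = target then max ans len1 else ans
      maxSubInner target rest s1 len1 ans1

-- Source B's while-loop: scan each suffix, then drop its head (suffix = suffix[1:]).
def maxSubOuter (target : Int) : List Int → Int → Int
  | [], ans => ans
  | x :: rest, ans => maxSubOuter target rest (maxSubInner target (x :: rest) 0 0 ans)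

def maxSubArrayLen2_alt (nums : List Int) (target : Int) : Int :=
  maxSubOuter target nums 0

-- ===== PRECONDITION & SPEC =====
def Spec_maxSubArrayLen2 (nums : List Int) (target : Int) (out : Int) : Prop := out = maxSubArrayLen2_alt nums target
instance (nums : List Int) (target : Int) (out : Int) : Decidable (Spec_maxSubArrayLen2 nums target out) := by unfold Spec_maxSubArrayLen2; infer_instance

-- ===== CLAIM (what is proved, stated in full; the proofs are below) =====
def Claim_equal_maxSubArrayLen2 : Prop := ∀ (nums : List Int) (target : Int), Dom_maxSubArrayLen2 nums target → Spec_maxSubArrayLen2 nums target (maxSubArrayLen2 nums target)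

-- ===== LEMMAS AND PROOFS =====

-- pfx sum of the first j elements
def pSum (nums : List Int) (j : Nat) : Int := (nums.take j).sum

-- (i, j) delimits a contiguous subarray of nums summing to target
def Good (nums : List Int) (target : Int) (i j : Nat) : Prop :=
  i < j ∧ j ≤ nums.length ∧ pSum nums j - pSum nums i = target

-- out is the length of the longest subarray summing to target (0 if none)
def IsBest (nums : List Int) (target : Int) (out : Int) : Prop :=
  0 ≤ out ∧
  (out = 0 ∨ ∃ i j : Nat, Good nums target i j ∧ out = (j : Int) - (i : Int)) ∧
  (∀ i j : Nat, Good nums target i j → (j : Int) - (i : Int) ≤ out)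

lemma isBest_unique {nums : List Int} {target a b : Int}
    (ha : IsBest nums target a) (hb : IsBest nums target b) : a = b := by
  obtain ⟨ha0, haw, hab⟩ := ha
  obtain ⟨hb0, hbw, hbb⟩ := hb
  have h1 : a ≤ b := by
    rcases haw with h | ⟨i, j, hg, he⟩
    · omega
    · have := hbb i j hg; omega
  have h2 : b ≤ a := by
    rcases hbw with h | ⟨i, j, hg, he⟩
    · omega
    · have := hab i j hg; omega
  omega

lemma pSum_succ (nums : List Int) (m : Nat) (x : Int) (hx : nums[m]? = some x) :
    pSum nums (m + 1) = pSum nums m + x := by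
  simp [pSum, List.take_add_one, hx]

lemma pSum_cons_succ (x : Int) (rest : List Int) (k : Nat) :
    pSum (x :: rest) (k + 1) = x + pSum rest k := by
  simp [pSum]

lemma maxSubInner_spec (target : Int) (l : List Int) (s len ans : Int) :
    ans ≤ maxSubInner target l s len ans ∧
    (∀ m : Nat, 1 ≤ m → m ≤ l.length → s + (l.take m).sum = target →
      len + (m : Int) ≤ maxSubInner target l s len ans) ∧
    (maxSubInner target l s len ans = ans ∨
      ∃ m : Nat, 1 ≤ m ∧ m ≤ l.length ∧ s + (l.take m).sum = target ∧
        maxSubInner target l s len ans = len + (m : Int)) := by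
  induction l generalizing s len ans with
  | nil =>
      refine ⟨le_refl _, ?_, Or.inl rfl⟩
      intro m h1 h2
      simp at h2
      omega
  | cons x rest ih =>
      simp only [maxSubInner]
      set ans1 := if s + x = target then max ans (len + 1) else ans with hans1
      obtain ⟨imono, ibound, iatt⟩ := ih (s + x) (len + 1) ans1
      have hmono : ans ≤ ans1 := by
        rw [hans1]; split_ifs with h
        · exact le_max_left _ _
        · exact le_refl _
      refine ⟨le_trans hmono imono, ?_, ?_⟩
      · intro m h1 h2 h3
        match m, h1 with
        | 1, _ =>
            simp at h3
            have : len + 1 ≤ ans1 := by rw [hans1]; simp [h3]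
            push_cast
            exact le_trans this imono
        | (m' + 2), _ =>
            have h3' : (s + x) + (rest.take (m' + 1)).sum = target := by
              simp [List.take_succ_cons] at h3; linarith
            have := ibound (m' + 1) (by omega) (by simpa using h2) h3'
            push_cast at this ⊢
            linarith
      · rcases iatt with h | ⟨m', hm1, hm2, hm3, hm4⟩
        · rw [h, hans1]
          split_ifs with hc
          · rcases max_choice ans (len + 1) with h' | h'
            · exact Or.inl h'
            · refine Or.inr ⟨1, le_refl _, by simp, by simpa using hc, by rw [h']; push_cast; ring⟩
          · exact Or.inl rfl
        · refine Or.inr ⟨m' + 1, by omega, by simpa using hm2, ?_, ?_⟩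
          · simp [List.take_succ_cons]; linarith
          · rw [hm4]; push_cast; ring

lemma maxSubOuter_spec (target : Int) (l : List Int) (ans : Int) :
    ans ≤ maxSubOuter target l ans ∧
    (∀ i j : Nat, i < j → j ≤ l.length → pSum l j - pSum l i = target →
      (j : Int) - (i : Int) ≤ maxSubOuter target l ans) ∧
    (maxSubOuter target l ans = ans ∨
      ∃ i j : Nat, i < j ∧ j ≤ l.length ∧ pSum l j - pSum l i = target ∧
        maxSubOuter target l ans = (j : Int) - (i : Int)) := by
  induction l generalizing ans with
  | nil =>
      refine ⟨le_refl _, ?_, Or.inl rfl⟩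
      intro i j h1 h2; simp at h2; omega
  | cons x rest ih =>
      simp only [maxSubOuter]
      set A1 := maxSubInner target (x :: rest) 0 0 ans with hA1
      obtain ⟨imono, ibound, iatt⟩ := maxSubInner_spec target (x :: rest) 0 0 ans
      obtain ⟨omono, obound, oatt⟩ := ih A1
      refine ⟨le_trans imono omono, ?_, ?_⟩
      · intro i j h1 h2 h3
        match i with
        | 0 =>
            have hps0 : pSum (x :: rest) 0 = 0 := by simp [pSum]
            have := ibound j (by omega) h2 (by simp [pSum] at h3 ⊢; linarith)
            simp only [Nat.cast_zero, sub_zero]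
            calc (j : Int) = 0 + (j : Int) := by ring
            _ ≤ A1 := this
            _ ≤ _ := omono
        | (i' + 1) =>
            match j with
            | (j' + 1) =>
                have h3' : pSum rest j' - pSum rest i' = target := by
                  rw [pSum_cons_succ, pSum_cons_succ] at h3; linarith
                have := obound i' j' (by omega) (by simpa using h2) h3'
                push_cast at this ⊢; linarith
      · rcases oatt with h | ⟨i, j, g1, g2, g3, g4⟩
        · rw [h]
          rcases iatt with h' | ⟨m, hm1, hm2, hm3, hm4⟩
          · exact Or.inl h'
          · refine Or.inr ⟨0, m, by omega, hm2, ?_, by rw [hA1, hm4]; push_cast; ring⟩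
            simp [pSum]; linarith
        · refine Or.inr ⟨i + 1, j + 1, by omega, by simpa using g2, ?_, ?_⟩
          · rw [pSum_cons_succ, pSum_cons_succ]; linarith
          · rw [g4]; push_cast; ring

lemma alt_isBest (nums : List Int) (target : Int) :
    IsBest nums target (maxSubArrayLen2_alt nums target) := by
  obtain ⟨mono, bound, att⟩ := maxSubOuter_spec target nums 0
  refine ⟨mono, ?_, ?_⟩
  · rcases att with h | ⟨i, j, g1, g2, g3, g4⟩
    · exact Or.inl h
    · exact Or.inr ⟨i, j, ⟨g1, g2, g3⟩, g4⟩
  · intro i j ⟨g1, g2, g3⟩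
    exact bound i j g1 g2 g3

-- the dict invariant: index maps a pfx-sum value to the (0-based) index of its FIRST occurrence among pSum 1 .. pSum m
def DictInv (nums : List Int) (m : Nat) (index : PySem.Dict Int Int) : Prop :=
  ∀ p t, index.get? p = some t ↔
    ∃ u : Nat, t = (u : Int) ∧ u < m ∧ pSum nums (u + 1) = p ∧
      ∀ v : Nat, v < u → pSum nums (v + 1) ≠ p

lemma loopA_spec (nums : List Int) (target : Int) :
    ∀ (rest : List Int) (m : Nat) (index : PySem.Dict Int Int) (ans : Int),
    rest = nums.drop m → m ≤ nums.length →
    DictInv nums m index →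
    0 ≤ ans →
    (∀ i j : Nat, i < j → j ≤ m → pSum nums j - pSum nums i = target →
      (j : Int) - (i : Int) ≤ ans) →
    (ans = 0 ∨ ∃ i j : Nat, i < j ∧ j ≤ m ∧ pSum nums j - pSum nums i = target ∧
      ans = (j : Int) - (i : Int)) →
    IsBest nums target (maxSubArrayLen2Loop target rest (m : Int) (pSum nums m) index ans) := by
  intro rest
  induction rest with
  | nil =>
      intro m index ans hrest hm hdict h0 hbound hatt
      have hlen : m = nums.length := by
        have := congrArg List.length hrest
        simp at this; omega
      simp only [maxSubArrayLen2Loop]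
      refine ⟨h0, ?_, ?_⟩
      · rcases hatt with h | ⟨i, j, g1, g2, g3, g4⟩
        · exact Or.inl h
        · exact Or.inr ⟨i, j, ⟨g1, by omega, g3⟩, g4⟩
      · intro i j ⟨g1, g2, g3⟩
        exact hbound i j g1 (by omega) g3
  | cons x rest' ih =>
      intro m index ans hrest hm hdict h0 hbound hatt
      have hmlt : m < nums.length := by
        by_contra h
        have hnil : nums.drop m = [] := List.drop_eq_nil_of_le (by omega)
        rw [hnil] at hrest
        simp at hrest
      have hx : nums[m]? = some x := by
        have h0' : (nums.drop m)[0]? = some x := by rw [← hrest]; rfl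
        simpa using h0'
      have hrest' : rest' = nums.drop (m + 1) := by
        have := congrArg List.tail hrest
        simpa [List.tail_drop] using this
      have hpsucc : pSum nums (m + 1) = pSum nums m + x := pSum_succ nums m x hx
      have hcanon : ((m : Int) + 1) = ((m + 1 : Nat) : Int) := by push_cast; ring
      -- first occurrence of a prefix-sum value is in the dict
      have hfind : ∀ p (v : Nat), v < m → pSum nums (v + 1) = p →
          ∃ u : Nat, u ≤ v ∧ index.get? p = some (u : Int) ∧
            pSum nums (u + 1) = p ∧ ∀ w, w < u → pSum nums (w + 1) ≠ p := by
        intro p v hv hp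
        have hex : ∃ n, pSum nums (n + 1) = p := ⟨v, hp⟩
        have hle : Nat.find hex ≤ v := Nat.find_min' hex hp
        refine ⟨Nat.find hex, hle, ?_, Nat.find_spec hex, fun w hw => Nat.find_min hex hw⟩
        exact (hdict p _).mpr ⟨Nat.find hex, rfl, by omega, Nat.find_spec hex,
          fun w hw => Nat.find_min hex hw⟩
      have hcontT : ∀ q, index.contains q = true → ∃ t, index.get? q = some t := by
        intro q h
        rw [PySem.Dict.contains_eq_isSome_get?] at h
        exact Option.isSome_iff_exists.mp h
      have hcontF : ∀ q, index.contains q = false → index.get? q = none := by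
        intro q h
        rw [PySem.Dict.contains_eq_isSome_get?] at h
        exact Option.not_isSome_iff_eq_none.mp (by simp [h])
      have hnoprev : ∀ q, index.contains q = false → ∀ v, v < m → pSum nums (v + 1) ≠ q := by
        intro q h v hv hq
        obtain ⟨u, _, hg, _, _⟩ := hfind q v hv hq
        rw [hcontF q h] at hg
        simp at hg
      set a1 := (if x = target then max ans 1 else ans) with ha1def
      set a2 := (if pSum nums m + x = target then max a1 ((m : Int) + 1) else a1) with ha2def
      set idx1 := (if index.contains (pSum nums m + x) then index
                   else index.insert (pSum nums m + x) (m : Int)) with hidxdef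
      set a3 := ((match index.get? (pSum nums m + x - target) with
                  | some t => max a2 ((m : Int) - t)
                  | none => a2) : Int) with ha3def
      have hstep : maxSubArrayLen2Loop target (x :: rest') (m : Int) (pSum nums m) index ans
          = maxSubArrayLen2Loop target rest' ((m : Int) + 1) (pSum nums m + x) idx1 a3 := by
        rw [ha3def, ha2def, ha1def, hidxdef]
        simp only [maxSubArrayLen2Loop]
      have h01 : ans ≤ a1 := by
        rw [ha1def]; split_ifs
        · exact le_max_left _ _
        · exact le_refl _
      have h12 : a1 ≤ a2 := by
        rw [ha2def]; split_ifs
        · exact le_max_left _ _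
        · exact le_refl _
      have h23 : a2 ≤ a3 := by
        rw [ha3def]
        rcases hg : index.get? (pSum nums m + x - target) with _ | t
        · exact le_refl _
        · exact le_max_left _ _
      -- dict invariant at m + 1
      have hdict1 : DictInv nums (m + 1) idx1 := by
        rw [hidxdef]
        by_cases hc : index.contains (pSum nums m + x) = true
        · rw [if_pos hc]
          intro p t
          constructor
          · intro hgp
            obtain ⟨u, hu1, hu2, hu3, hu4⟩ := (hdict p t).mp hgp
            exact ⟨u, hu1, by omega, hu3, hu4⟩
          · rintro ⟨u, ht, hu, hp, hmin⟩
            rcases Nat.lt_succ_iff_lt_or_eq.mp hu with h | rfl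
            · exact (hdict p t).mpr ⟨u, ht, h, hp, hmin⟩
            · obtain ⟨t', hgt'⟩ := hcontT _ hc
              obtain ⟨u', _, hu'm, hp', _⟩ := (hdict _ t').mp hgt'
              exfalso
              exact hmin u' hu'm (by rw [hp', ← hpsucc, hp])
        · have hcf : index.contains (pSum nums m + x) = false := by simpa using hc
          rw [if_neg hc]
          intro p t
          rw [PySem.Dict.get?_insert]
          split_ifs with hpk
          · subst hpk
            constructor
            · intro hsome
              have ht : t = (m : Int) := by
                have := Option.some.inj hsome; omega
              exact ⟨m, ht, by omega, hpsucc.symm ▸ rfl,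
                fun v hv => hnoprev _ hcf v hv⟩
            · rintro ⟨u, ht, hu, hp, hmin⟩
              have hum : u = m := by
                by_contra hne
                exact hnoprev _ hcf u (by omega) hp
              rw [ht, hum]
          · constructor
            · intro hgp
              obtain ⟨u, hu1, hu2, hu3, hu4⟩ := (hdict p t).mp hgp
              exact ⟨u, hu1, by omega, hu3, hu4⟩
            · rintro ⟨u, ht, hu, hp, hmin⟩
              have hum : u < m := by
                rcases Nat.lt_succ_iff_lt_or_eq.mp hu with h | rfl
                · exact h
                · exact absurd (by rw [← hp, hpsucc]) hpk
              exact (hdict p t).mpr ⟨u, ht, hum, hp, hmin⟩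
      -- bound at m + 1
      have hbound1 : ∀ i j : Nat, i < j → j ≤ m + 1 → pSum nums j - pSum nums i = target →
          (j : Int) - (i : Int) ≤ a3 := by
        intro i j hij hjm hsum
        by_cases hjle : j ≤ m
        · exact le_trans (hbound i j hij hjle hsum) (le_trans h01 (le_trans h12 h23))
        · have hj : j = m + 1 := by omega
          subst hj
          match i, hij with
          | 0, _ =>
              have hps0 : pSum nums 0 = 0 := by simp [pSum]
              have htg : pSum nums m + x = target := by
                rw [← hpsucc]; rw [hps0] at hsum; linarith
              have hle : (m : Int) + 1 ≤ a2 := by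
                rw [ha2def, if_pos htg]; exact le_max_right _ _
              push_cast
              linarith
          | (u + 1), _ =>
              have hum : u < m := by omega
              have hpu : pSum nums (u + 1) = pSum nums m + x - target := by
                rw [← hpsucc]; linarith
              obtain ⟨u0, hu0le, hg0, _, _⟩ := hfind _ u hum hpu
              have hle : (m : Int) - (u0 : Int) ≤ a3 := by
                rw [ha3def, hg0]; exact le_max_right _ _
              have hc0 : (u0 : Int) ≤ (u : Int) := by exact_mod_cast hu0le
              push_cast
              linarith
      -- attainability at m + 1
      have hatt1 : a3 = 0 ∨ ∃ i j : Nat, i < j ∧ j ≤ m + 1 ∧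
          pSum nums j - pSum nums i = target ∧ a3 = (j : Int) - (i : Int) := by
        have step3 : a3 = a2 ∨ ∃ i j : Nat, i < j ∧ j ≤ m + 1 ∧
            pSum nums j - pSum nums i = target ∧ a3 = (j : Int) - (i : Int) := by
          rw [ha3def]
          rcases hg : index.get? (pSum nums m + x - target) with _ | t
          · exact Or.inl rfl
          · rcases max_choice a2 ((m : Int) - t) with h | h
            · exact Or.inl h
            · obtain ⟨u, htu, hum, hpu, _⟩ := (hdict _ t).mp hg
              subst htu
              refine Or.inr ⟨u + 1, m + 1, by omega, le_refl _, ?_, ?_⟩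
              · rw [hpu, hpsucc]; ring
              · show max a2 ((m : Int) - (u : Int)) = ((m + 1 : Nat) : Int) - ((u + 1 : Nat) : Int)
                rw [h]; push_cast; ring
        have step2 : a2 = a1 ∨ ∃ i j : Nat, i < j ∧ j ≤ m + 1 ∧
            pSum nums j - pSum nums i = target ∧ a2 = (j : Int) - (i : Int) := by
          rw [ha2def]
          split_ifs with hc
          · rcases max_choice a1 ((m : Int) + 1) with h | h
            · exact Or.inl h
            · refine Or.inr ⟨0, m + 1, by omega, le_refl _, ?_, ?_⟩
              · have hps0 : pSum nums 0 = 0 := by simp [pSum]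
                rw [hps0, hpsucc, hc]; ring
              · rw [h]; push_cast; ring
          · exact Or.inl rfl
        have step1 : a1 = ans ∨ ∃ i j : Nat, i < j ∧ j ≤ m + 1 ∧
            pSum nums j - pSum nums i = target ∧ a1 = (j : Int) - (i : Int) := by
          rw [ha1def]
          split_ifs with hc
          · rcases max_choice ans 1 with h | h
            · exact Or.inl h
            · refine Or.inr ⟨m, m + 1, by omega, le_refl _, ?_, ?_⟩
              · rw [hpsucc, hc]; ring
              · rw [h]; push_cast; ring
          · exact Or.inl rfl
        rcases step3 with h3 | h3
        · rcases step2 with h2 | h2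
          · rcases step1 with h1 | h1
            · rcases hatt with h | ⟨i, j, g1, g2, g3, g4⟩
              · exact Or.inl (by rw [h3, h2, h1, h])
              · exact Or.inr ⟨i, j, g1, by omega, g3, by rw [h3, h2, h1, g4]⟩
            · obtain ⟨i, j, g1, g2, g3, g4⟩ := h1
              exact Or.inr ⟨i, j, g1, g2, g3, by rw [h3, h2, g4]⟩
          · obtain ⟨i, j, g1, g2, g3, g4⟩ := h2
            exact Or.inr ⟨i, j, g1, g2, g3, by rw [h3, g4]⟩
        · exact Or.inr h3
      rw [hstep, hcanon, ← hpsucc]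
      exact ih (m + 1) idx1 a3 hrest' (by omega) hdict1
        (le_trans h0 (le_trans h01 (le_trans h12 h23))) hbound1 hatt1

lemma a_isBest (nums : List Int) (target : Int) :
    IsBest nums target (maxSubArrayLen2 nums target) := by
  have h := loopA_spec nums target nums 0 PySem.Dict.empty 0 (by simp) (by omega)
    ?_ (le_refl 0) ?_ (Or.inl rfl)
  · simpa [maxSubArrayLen2, pSum] using h
  · intro p t
    simp [PySem.Dict.get?_empty]
  · intro i j h1 h2; omega

-- ===== VERDICT (by name: the statement is the Claim_ definition above) =====
theorem maxSubArrayLen2_spec : Claim_equal_maxSubArrayLen2 := by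
  intro nums target _
  unfold Spec_maxSubArrayLen2
  exact isBest_unique (a_isBest nums target) (alt_isBest nums target)
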